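-- pv_equiv track=rewrite | github.com/DaoHuy-006/HIT_Python_Public_2025 | b3.py | dem_va_tinh_tong
-- ===== SOURCE A (Python) =====
-- def dem_va_tinh_tong(n):
--     so_chu_so = 0
--     tong = 0
--     so = n
--     while n > 0:
--          chu_so = n % 10
--          tong += chu_so
--          so_chu_so += 1
--          n = n // 10
--     return so, so_chu_so, tong
-- ===== SOURCE B (Python) =====
-- def dem_va_tinh_tong(n):
--     if n <= 0:
--         return n, 0, 0
--     s = str(n)
--     return n, len(s), sum(int(c) for c in s)
-- ===== Notes on version B (the rewrite author's own statement) =====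
-- stated objective: idiomatic
-- what changed: B replaces the mod/floordiv peeling loop with the decimal string representation str(n): the count is the length of the string and the sum is the sum of its digit characters; nonpositive inputs keep A's empty-loop result.
import Mathlib
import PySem

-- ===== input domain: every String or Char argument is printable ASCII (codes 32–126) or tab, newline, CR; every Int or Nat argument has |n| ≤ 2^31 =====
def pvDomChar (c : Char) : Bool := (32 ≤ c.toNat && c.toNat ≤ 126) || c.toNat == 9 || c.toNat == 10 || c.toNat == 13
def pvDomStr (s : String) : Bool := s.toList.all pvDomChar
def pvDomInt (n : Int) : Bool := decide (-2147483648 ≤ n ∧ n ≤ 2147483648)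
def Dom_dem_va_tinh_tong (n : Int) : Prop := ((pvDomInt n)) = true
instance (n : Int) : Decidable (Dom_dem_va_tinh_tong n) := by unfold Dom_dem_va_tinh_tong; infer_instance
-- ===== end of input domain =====

-- B counts/sums the digits of str(n) instead of peeling with % and // — idiomatic, same cost.

-- ===== PORT A =====
-- the while loop: state (so_chu_so, tong), n halved by // 10 each turn
def demLoopA (n : Int) (so_chu_so : Int) (tong : Int) : Int × Int :=
  if _h : 0 < n then
    demLoopA (PySem.Int.floordiv n 10) (so_chu_so + 1) (tong + PySem.Int.mod n 10)
  else
    (so_chu_so, tong)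
termination_by n.toNat
decreasing_by
  have h10 : PySem.Int.floordiv n 10 = n / 10 := PySem.Int.floordiv_eq_ediv_of_pos (by omega)
  rw [h10]
  omega

def dem_va_tinh_tong (n : Int) : Int × Int × Int :=
  let r := demLoopA n 0 0
  (n, r.1, r.2)

-- ===== PORT B =====
-- int(c) for one decimal digit character is ported by hand as ord(c) - 48; this is exact
-- because str(n) for 0 < n consists only of the characters '0'..'9'.
def dem_va_tinh_tong_alt (n : Int) : Int × Int × Int :=
  if n ≤ 0 then (n, 0, 0)
  else
    let s := PySem.Int.toChars n   -- str(n), taken as its character list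
    (n, PySem.List.len s, (s.map (fun c => (c.toNat : Int) - 48)).sum)

-- ===== PRECONDITION & SPEC =====
def Spec_dem_va_tinh_tong (n : Int) (out : Int × Int × Int) : Prop := out = dem_va_tinh_tong_alt n
instance (n : Int) (out : Int × Int × Int) : Decidable (Spec_dem_va_tinh_tong n out) := by unfold Spec_dem_va_tinh_tong; infer_instance

-- ===== CLAIM (what is proved, stated in full; the proofs are below) =====
def Claim_equal_dem_va_tinh_tong : Prop := ∀ (n : Int), Dom_dem_va_tinh_tong n → Spec_dem_va_tinh_tong n (dem_va_tinh_tong n)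

-- ===== LEMMAS AND PROOFS =====

-- big-endian digit characters of m, recursion proof-side mirror of Nat.toDigits
def pvDigits (m : Nat) : List Char :=
  let d := (m % 10).digitChar
  if _h : m / 10 = 0 then [d] else pvDigits (m / 10) ++ [d]
termination_by m
decreasing_by exact Nat.div_lt_self (by omega) (by omega)

theorem toDigitsCore_shift : ∀ (fuel m : Nat) (ds : List Char),
    Nat.toDigitsCore 10 fuel m ds = Nat.toDigitsCore 10 fuel m [] ++ ds := by
  intro fuel
  induction fuel with
  | zero => intro m ds; simp [Nat.toDigitsCore]
  | succ f ih =>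
    intro m ds
    simp only [Nat.toDigitsCore]
    by_cases h : m / 10 = 0
    · simp [h]
    · simp only [h, if_false]
      rw [ih (m / 10) ((m % 10).digitChar :: ds), ih (m / 10) [(m % 10).digitChar]]
      simp

theorem toDigitsCore_eq_pvDigits : ∀ (m fuel : Nat), m < fuel →
    Nat.toDigitsCore 10 fuel m [] = pvDigits m := by
  intro m
  induction m using Nat.strong_induction_on with
  | _ m ih =>
    intro fuel hm
    obtain ⟨f, rfl⟩ : ∃ f, fuel = f + 1 := ⟨fuel - 1, by omega⟩
    rw [pvDigits]
    simp only [Nat.toDigitsCore]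
    by_cases h : m / 10 = 0
    · simp [h]
    · simp only [h, if_false]
      rw [toDigitsCore_shift,
        ih (m / 10) (Nat.div_lt_self (by omega) (by omega)) f (by omega)]
      simp

theorem digitChar_toNat (d : Nat) (hd : d < 10) : ((d.digitChar).toNat : Int) - 48 = (d : Int) := by
  interval_cases d <;> decide

theorem demLoopA_eq : ∀ (m : Nat), 0 < m → ∀ (c t : Int),
    demLoopA (m : Int) c t =
      (c + (pvDigits m).length, t + ((pvDigits m).map (fun ch => (ch.toNat : Int) - 48)).sum) := by
  intro m
  induction m using Nat.strong_induction_on with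
  | _ m ih =>
    intro hm c t
    rw [demLoopA]
    simp only [dif_pos (by exact_mod_cast hm : (0:Int) < (m:Int))]
    rw [pvDigits]
    have hdiv : PySem.Int.floordiv (m : Int) 10 = ((m / 10 : Nat) : Int) :=
      PySem.Int.floordiv_natCast m 10
    have hmod : PySem.Int.mod (m : Int) 10 = ((m % 10 : Nat) : Int) :=
      PySem.Int.mod_natCast m 10
    rw [hdiv, hmod]
    by_cases h : m / 10 = 0
    · rw [demLoopA]
      simp only [h, dif_pos, Nat.cast_zero]
      rw [dif_neg (by omega)]
      simp [digitChar_toNat (m % 10) (Nat.mod_lt m (by omega))]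
    · rw [ih (m / 10) (Nat.div_lt_self (by omega) (by omega)) (by omega)]
      simp only [dif_neg h]
      simp [digitChar_toNat (m % 10) (Nat.mod_lt m (by omega))]
      constructor <;> ring

theorem demLoopA_nonpos (n : Int) (h : n ≤ 0) (c t : Int) : demLoopA n c t = (c, t) := by
  rw [demLoopA]; simp [show ¬ 0 < n by omega]

-- ===== VERDICT (by name: the statement is the Claim_ definition above) =====
theorem dem_va_tinh_tong_spec : Claim_equal_dem_va_tinh_tong := by
  intro n _
  unfold Spec_dem_va_tinh_tong dem_va_tinh_tong dem_va_tinh_tong_alt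
  by_cases h : n ≤ 0
  · simp [demLoopA_nonpos n h, h]
  · have hm : n = ((n.toNat : Nat) : Int) := by omega
    have hpos : 0 < n.toNat := by omega
    rw [if_neg h]
    simp only [PySem.Int.toChars, if_neg (by omega : ¬ n < 0), Nat.toDigits]
    rw [toDigitsCore_eq_pvDigits n.toNat (n.toNat + 1) (by omega)]
    have hd := demLoopA_eq n.toNat hpos 0 0
    rw [← hm] at hd
    rw [hd]
    simp [PySem.List.len_eq]
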